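-- pv_equiv track=rewrite | github.com/Nikita-Chernyshov/Chernyshov-LP | pr7var10n1.py | find
-- ===== SOURCE A (Python) =====
-- def find(N):
--     schet = 0
--     b = []
--     arr = [i for i in range (0, 10)]
--     for i in arr:
--         for k in arr:
--             for s in arr:
--                 if s!=k and k!=i and s!=i:
--                     z=s*100 + k*10+i
--                     if z>=100 and z<N:
--                         return schet
-- ===== SOURCE B (Python) =====
-- def find(N):
--     z = 100
--     while z < N:
--         a = z // 100
--         b = (z // 10) % 10
--         c = z % 10
--         if a != b and b != c and a != c:
--             return 0
--         z += 1
--     return None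
-- ===== Notes on version B (the rewrite author's own statement) =====
-- stated objective: alternative
-- what changed: B scans candidate integers upward from the smallest three-digit number while they stay below N, decomposing each into its digits and returning the counter at the first pairwise-distinct-digit hit, instead of A's triple nested loop that generates candidates from digit triples.
import Mathlib
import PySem

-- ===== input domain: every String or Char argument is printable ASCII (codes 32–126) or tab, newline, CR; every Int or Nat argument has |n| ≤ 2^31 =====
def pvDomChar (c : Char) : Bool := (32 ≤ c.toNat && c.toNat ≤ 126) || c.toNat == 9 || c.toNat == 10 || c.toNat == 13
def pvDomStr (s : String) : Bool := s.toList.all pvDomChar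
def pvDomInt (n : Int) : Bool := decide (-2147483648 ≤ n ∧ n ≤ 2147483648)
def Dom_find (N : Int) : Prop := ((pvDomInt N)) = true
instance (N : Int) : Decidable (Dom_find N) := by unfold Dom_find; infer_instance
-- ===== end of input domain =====

-- B scans integers from 100 upward and tests each number's digits, instead of A's
-- triple nested digit loop; both return 0 at the first hit and none otherwise.

-- ===== PORT A =====
-- A: triple nested for over arr = range(0,10) with early 'return schet' (schet = 0),
-- falling off the loops returns None; the early return is the Option short-circuit findSome?.
def find (N : Int) : Option Int :=
  let _schet : Int := 0
  let arr := PySem.List.pyRange 0 10 1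
  arr.findSome? fun i =>
    arr.findSome? fun k =>
      arr.findSome? fun s =>
        if s ≠ k ∧ k ≠ i ∧ s ≠ i then
          let z := s * 100 + k * 10 + i
          if z ≥ 100 ∧ z < N then some _schet else none
        else none

-- ===== PORT B =====
-- B's while loop: z runs from 100 while z < N; return 0 on the first z with three
-- pairwise distinct digits, None when the loop exhausts.
def findAltLoop (N z : Int) : Option Int :=
  if h : z < N then
    let a := PySem.Int.floordiv z 100
    let b := PySem.Int.mod (PySem.Int.floordiv z 10) 10
    let c := PySem.Int.mod z 10
    if a ≠ b ∧ b ≠ c ∧ a ≠ c then some 0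
    else findAltLoop N (z + 1)
  else none
termination_by (N - z).toNat
decreasing_by omega

def find_alt (N : Int) : Option Int := findAltLoop N 100

-- ===== PRECONDITION & SPEC =====
def Spec_find (N : Int) (out : Option Int) : Prop := out = find_alt N
instance (N : Int) (out : Option Int) : Decidable (Spec_find N out) := by unfold Spec_find; infer_instance

-- ===== CLAIM (what is proved, stated in full; the proofs are below) =====
def Claim_equal_find : Prop := ∀ (N : Int), Dom_find N → Spec_find N (find N)

-- ===== LEMMAS AND PROOFS =====

-- Both sides equal this closed form; proved separately for each port.
def pvModel (N : Int) : Option Int := if 103 ≤ N then some 0 else none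

lemma findAltLoop_of_le (N z : Int) (h : N ≤ z) : findAltLoop N z = none := by
  rw [findAltLoop]; simp [show ¬ z < N by omega]

lemma find_alt_eq (N : Int) : find_alt N = pvModel N := by
  unfold find_alt pvModel
  by_cases h3 : 103 ≤ N
  · rw [findAltLoop, dif_pos (by omega : (100:Int) < N), if_neg (by decide)]
    rw [findAltLoop, dif_pos (by omega : (100:Int) + 1 < N), if_neg (by decide)]
    rw [findAltLoop, dif_pos (by omega : (100:Int) + 1 + 1 < N), if_pos (by decide)]
    rw [if_pos h3]
  · rw [if_neg h3]
    by_cases h0 : N ≤ 100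
    · exact findAltLoop_of_le N 100 h0
    · rw [findAltLoop, dif_pos (by omega : (100:Int) < N), if_neg (by decide)]
      by_cases h1 : N ≤ 101
      · exact findAltLoop_of_le N (100 + 1) (by omega)
      · rw [findAltLoop, dif_pos (by omega : (100:Int) + 1 < N), if_neg (by decide)]
        exact findAltLoop_of_le N (100 + 1 + 1) (by omega)

-- findSome? over a function whose values are only none / some 0 yields none or some 0 …
lemma findSome?_zero_or_none (l : List Int) (f : Int → Option Int)
    (h : ∀ x ∈ l, f x = none ∨ f x = some 0) :
    l.findSome? f = none ∨ l.findSome? f = some 0 := by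
  induction l with
  | nil => simp
  | cons a t ih =>
    rcases h a (by simp) with ha | ha
    · rw [List.findSome?_cons_of_isNone (by simp [ha])]
      exact ih (fun x hx => h x (by simp [hx]))
    · right
      rw [List.findSome?_cons_of_isSome (by simp [ha]), ha]

-- … and it yields some 0 as soon as one element hits some 0.
lemma findSome?_eq_some_zero (l : List Int) (f : Int → Option Int) :
    (∀ x ∈ l, f x = none ∨ f x = some 0) →
    ∀ x₀ ∈ l, f x₀ = some 0 → l.findSome? f = some 0 := by
  induction l with
  | nil => intro _ x₀ hx₀; simp at hx₀
  | cons a t ih =>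
    intro h x₀ hx₀ hf
    rcases h a (by simp) with ha | ha
    · rw [List.findSome?_cons_of_isNone (by simp [ha])]
      rcases List.mem_cons.mp hx₀ with rfl | hm
      · rw [ha] at hf; cases hf
      · exact ih (fun x hx => h x (by simp [hx])) x₀ hm hf
    · rw [List.findSome?_cons_of_isSome (by simp [ha]), ha]

-- the innermost body of A's nest produces only none / some 0
lemma find_inner_zero_or_none (N i k s : Int) :
    (if s ≠ k ∧ k ≠ i ∧ s ≠ i then
       if s * 100 + k * 10 + i ≥ 100 ∧ s * 100 + k * 10 + i < N then some (0:Int) else none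
     else none) = none ∨
    (if s ≠ k ∧ k ≠ i ∧ s ≠ i then
       if s * 100 + k * 10 + i ≥ 100 ∧ s * 100 + k * 10 + i < N then some (0:Int) else none
     else none) = some 0 := by
  split_ifs <;> simp

lemma find_eq (N : Int) : find N = pvModel N := by
  unfold find pvModel
  dsimp only
  have hval : ∀ i k : Int,
      (PySem.List.pyRange 0 10 1).findSome? (fun s =>
        if s ≠ k ∧ k ≠ i ∧ s ≠ i then
          if s * 100 + k * 10 + i ≥ 100 ∧ s * 100 + k * 10 + i < N then some (0:Int) else none
        else none) = none ∨
      (PySem.List.pyRange 0 10 1).findSome? (fun s =>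
        if s ≠ k ∧ k ≠ i ∧ s ≠ i then
          if s * 100 + k * 10 + i ≥ 100 ∧ s * 100 + k * 10 + i < N then some (0:Int) else none
        else none) = some 0 := by
    intro i k
    exact findSome?_zero_or_none _ _ (fun s _ => find_inner_zero_or_none N i k s)
  have hval2 : ∀ i : Int,
      (PySem.List.pyRange 0 10 1).findSome? (fun k =>
        (PySem.List.pyRange 0 10 1).findSome? (fun s =>
          if s ≠ k ∧ k ≠ i ∧ s ≠ i then
            if s * 100 + k * 10 + i ≥ 100 ∧ s * 100 + k * 10 + i < N then some (0:Int) else none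
          else none)) = none ∨
      (PySem.List.pyRange 0 10 1).findSome? (fun k =>
        (PySem.List.pyRange 0 10 1).findSome? (fun s =>
          if s ≠ k ∧ k ≠ i ∧ s ≠ i then
            if s * 100 + k * 10 + i ≥ 100 ∧ s * 100 + k * 10 + i < N then some (0:Int) else none
          else none)) = some 0 := by
    intro i
    exact findSome?_zero_or_none _ _ (fun k _ => hval i k)
  by_cases h3 : 103 ≤ N
  · rw [if_pos h3]
    refine findSome?_eq_some_zero _ _ (fun i _ => hval2 i) 2 (by decide) ?_
    refine findSome?_eq_some_zero _ _ (fun k _ => hval 2 k) 0 (by decide) ?_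
    refine findSome?_eq_some_zero _ _ (fun s _ => find_inner_zero_or_none N 2 0 s) 1 (by decide) ?_
    rw [if_pos (by decide)]
    rw [if_pos]
    constructor
    · norm_num
    · omega
  · rw [if_neg h3]
    rw [List.findSome?_eq_none_iff]
    intro i hi
    rw [List.findSome?_eq_none_iff]
    intro k hk
    rw [List.findSome?_eq_none_iff]
    intro s hs
    rw [PySem.List.mem_pyRange_one] at hi hk hs
    split_ifs with hd hz
    · exfalso; omega
    · rfl
    · rfl

-- ===== VERDICT (by name: the statement is the Claim_ definition above) =====
theorem find_spec : Claim_equal_find := by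
  intro N _
  unfold Spec_find
  rw [find_eq, find_alt_eq]
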